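-- pv_equiv track=rewrite | github.com/skyswordLi/Python-Core-Program | Chapter6/findChar.py | right_find_chr
-- ===== SOURCE A (Python) =====
-- def right_find_chr(string, char):
--     length = len(string)
--     i = -1
--     while i >= -length:
--         if string[i] == char:
--             return length + i
--         i -= 1
--     return -1
-- ===== SOURCE B (Python) =====
-- def right_find_chr(string, char):
--     last = -1
--     for i, ch in enumerate(string):
--         if ch == char:
--             last = i
--     return last
-- ===== Notes on version B (the rewrite author's own statement) =====
-- stated objective: simpler
-- what changed: Replaces A's backward while-loop over negative indices with early return by a single forward enumerate pass that accumulates the last matching index.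
import Mathlib
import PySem

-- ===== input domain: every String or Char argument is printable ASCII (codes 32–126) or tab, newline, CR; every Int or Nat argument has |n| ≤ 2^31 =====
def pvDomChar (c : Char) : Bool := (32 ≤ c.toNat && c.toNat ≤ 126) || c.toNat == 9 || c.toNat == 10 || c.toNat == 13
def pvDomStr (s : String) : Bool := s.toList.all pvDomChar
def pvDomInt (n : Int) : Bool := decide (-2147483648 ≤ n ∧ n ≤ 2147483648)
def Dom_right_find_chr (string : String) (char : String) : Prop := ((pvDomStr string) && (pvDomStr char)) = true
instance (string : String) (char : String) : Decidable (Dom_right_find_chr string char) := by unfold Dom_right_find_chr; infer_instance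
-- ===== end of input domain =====

-- B replaces A's backward scan (negative indices, early return) by a single forward
-- enumerate pass accumulating the last matching index; objective: simpler.

-- ===== PORT A =====
-- A's while-loop: i runs -1, -2, … while i ≥ -length; fuel (length+1) only makes the
-- recursion total — it is never exhausted before the loop's own exit condition fires.
def rfcLoopA (l c : List Char) (i : Int) (fuel : Nat) : Int :=
  match fuel with
  | 0 => -1
  | fuel + 1 =>
    if i ≥ -(l.length : Int) then
      match PySem.List.pyGet? l i with
      | some ch => if [ch] = c then (l.length : Int) + i else rfcLoopA l c (i - 1) fuel
      | none => -1
    else -1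

def right_find_chr (string : String) (char : String) : Int :=
  rfcLoopA string.toList char.toList (-1) (string.toList.length + 1)

-- ===== PORT B =====
def right_find_chr_alt (string : String) (char : String) : Int :=
  (PySem.List.enumerate string.toList).foldl
    (fun last p => if [p.2] = char.toList then p.1 else last) (-1)

-- ===== PRECONDITION & SPEC =====
def Spec_right_find_chr (string : String) (char : String) (out : Int) : Prop := out = right_find_chr_alt string char
instance (string : String) (char : String) (out : Int) : Decidable (Spec_right_find_chr string char out) := by unfold Spec_right_find_chr; infer_instance

-- ===== CLAIM (what is proved, stated in full; the proofs are below) =====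
def Claim_equal_right_find_chr : Prop := ∀ (string : String) (char : String), Dom_right_find_chr string char → Spec_right_find_chr string char (right_find_chr string char)

-- ===== LEMMAS AND PROOFS =====

-- shifting the loop one position left undoes appending one element on the right
-- one-step unfolding of A's loop
theorem rfcLoopA_succ (l c : List Char) (i : Int) (fuel : Nat) :
    rfcLoopA l c i (fuel + 1)
      = if i ≥ -(l.length : Int) then
          match PySem.List.pyGet? l i with
          | some ch => if [ch] = c then (l.length : Int) + i else rfcLoopA l c (i - 1) fuel
          | none => -1
        else -1 := rfl
theorem rfcLoopA_shift (x : Char) (l c : List Char) :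
    ∀ (fuel : Nat) (i : Int), i ≤ -1 →
      rfcLoopA (l ++ [x]) c (i - 1) fuel = rfcLoopA l c i fuel := by
  intro fuel
  induction fuel with
  | zero => intro i _; rfl
  | succ n ih =>
    intro i hi
    rw [rfcLoopA_succ, rfcLoopA_succ]
    by_cases h : i ≥ -(l.length : Int)
    · have h1 : i - 1 ≥ -(((l ++ [x]).length : Nat) : Int) := by
        simp only [List.length_append, List.length_cons, List.length_nil]; push_cast; omega
      have hget : PySem.List.pyGet? (l ++ [x]) (i - 1) = PySem.List.pyGet? l i := by
        simp only [PySem.List.pyGet?, PySem.List.pyIdx?, List.length_append,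
          List.length_cons, List.length_nil]
        rw [if_neg (by omega : ¬ (0:Int) ≤ i - 1), if_neg (by omega : ¬ (0:Int) ≤ i),
            if_pos (by push_cast; omega : -(((l.length + (0 + 1) : Nat)) : Int) ≤ i - 1),
            if_pos h]
        have heq : l.length + (0 + 1) - (-(i - 1)).toNat = l.length - (-i).toNat := by omega
        rw [heq]
        have hk : l.length - (-i).toNat < l.length := by omega
        simp only [Option.bind]
        rw [List.getElem?_append_left hk]
      rw [if_pos h1, if_pos h, hget]
      cases hg : PySem.List.pyGet? l i with
      | none => rfl
      | some ch =>
        by_cases hm : [ch] = c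
        · simp only [if_pos hm, List.length_append, List.length_cons, List.length_nil]
          show (((l.length + (0+1) : Nat)) : Int) + (i-1) = (l.length : Int) + i
          omega
        · simp only [if_neg hm]
          exact ih (i - 1) (by omega)
    · have h2 : ¬ i - 1 ≥ -(((l ++ [x]).length : Nat) : Int) := by
        simp only [List.length_append, List.length_cons, List.length_nil]
        push_cast
        omega
      rw [if_neg h2, if_neg h]

theorem rfcLoopA_eq_fold (c : List Char) (l : List Char) :
    rfcLoopA l c (-1) (l.length + 1)
      = (PySem.List.enumerate l).foldl
          (fun last p => if [p.2] = c then p.1 else last) (-1) := by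
  induction l using List.reverseRecOn with
  | nil => rfl
  | append_singleton l x ih =>
    rw [PySem.List.enumerate_append, List.foldl_append]
    simp only [PySem.List.enumerate, List.foldl_cons, List.foldl_nil]
    have hstep : rfcLoopA (l ++ [x]) c (-1) ((l ++ [x]).length + 1)
        = if [x] = c then (l.length : Int)
          else rfcLoopA l c (-1) (l.length + 1) := by
      rw [show (l ++ [x]).length + 1 = (l.length + 1) + 1 by simp, rfcLoopA_succ,
          if_pos (by simp : (-1 : Int) ≥ -(((l ++ [x]).length : Nat) : Int)),
          PySem.List.pyGet?_neg_one_append_singleton]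
      by_cases hm : [x] = c
      · simp only [if_pos hm, List.length_append, List.length_cons, List.length_nil]
        show (((l.length + (0+1) : Nat)) : Int) + -1 = (l.length : Int)
        omega
      · simp only [if_neg hm]
        exact rfcLoopA_shift x l c (l.length + 1) (-1) (by omega)
    rw [hstep, ih]
    by_cases hm : [x] = c
    · simp [hm]
    · simp [hm]

-- ===== VERDICT (by name: the statement is the Claim_ definition above) =====
theorem right_find_chr_spec : Claim_equal_right_find_chr := by
  intro string char _
  unfold Spec_right_find_chr right_find_chr right_find_chr_alt
  exact rfcLoopA_eq_fold char.toList string.toList
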